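-- pv_equiv track=rewrite | github.com/jessieroman/setup-ml-env | create-conda-env.py | compare_package_lists
-- ===== SOURCE A (Python) =====
-- def compare_package_lists(conda_list, requirements_list):
--   """Compares two lists of packages and returns a dictionary of differences."""
--   differences = {}
--   for package in conda_list:
--     if package not in requirements_list:
--       differences[package] = "conda"
--   for package in requirements_list:
--     if package not in conda_list:
--       differences[package] = "requirements"
--   return differences
-- ===== SOURCE B (Python) =====
-- def compare_package_lists(conda_list, requirements_list):
--   """Compares two lists of packages and returns a dictionary of differences."""
--   where = {}
--   for p in conda_list:
--     where[p] = where.get(p, 0) | 1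
--   for p in requirements_list:
--     where[p] = where.get(p, 0) | 2
--   return {p: ("conda" if w == 1 else "requirements")
--           for p, w in where.items() if w != 3}
-- ===== Notes on version B (the rewrite author's own statement) =====
-- stated objective: faster
-- what changed: Instead of A's two loops that test each package for membership in the other list, B makes one sweep over both lists building a single presence-bitmask dict (bit 1 = seen in conda_list, bit 2 = seen in requirements_list) and then emits, in one filtering pass over that dict, the entries whose mask is not 3.
import Mathlib
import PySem

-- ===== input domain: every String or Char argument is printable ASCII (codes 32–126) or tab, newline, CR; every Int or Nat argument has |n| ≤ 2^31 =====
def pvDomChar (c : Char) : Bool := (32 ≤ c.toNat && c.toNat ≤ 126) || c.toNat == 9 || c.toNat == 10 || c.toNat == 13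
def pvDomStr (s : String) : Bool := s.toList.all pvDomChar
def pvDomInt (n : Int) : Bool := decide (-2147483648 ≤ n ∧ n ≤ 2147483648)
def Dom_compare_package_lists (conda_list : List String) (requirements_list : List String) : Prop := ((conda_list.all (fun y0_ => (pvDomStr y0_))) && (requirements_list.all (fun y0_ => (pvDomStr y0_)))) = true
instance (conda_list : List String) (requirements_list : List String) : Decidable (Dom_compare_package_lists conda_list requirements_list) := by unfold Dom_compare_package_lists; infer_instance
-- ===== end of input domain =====

-- B replaces A's two cross-list membership-test loops by a single presence-bitmask dict (1 = conda,
-- 2 = requirements) built in one sweep over both lists, followed by a filtering comprehension; same dict.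

-- ===== PORT A =====
-- literal transliteration: an empty dict, one loop over conda_list inserting "conda" for packages not in
-- requirements_list, one loop over requirements_list inserting "requirements" for packages not in conda_list.
def compare_package_lists (conda_list : List String) (requirements_list : List String) : List (String × String) :=
  let differences : PySem.Dict String String := PySem.Dict.empty
  let differences := conda_list.foldl
    (fun d package => if requirements_list.contains package then d else d.insert package "conda") differences
  let differences := requirements_list.foldl
    (fun d package => if conda_list.contains package then d else d.insert package "requirements") differences
  differences.items

-- ===== PORT B =====
-- transliteration of Source B: `where[p] = where.get(p, 0) | 1` (resp. `| 2`) over each list, then the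
-- dict comprehension keeping entries with w != 3 and rendering 1 as "conda", 2 as "requirements".
def compare_package_lists_alt (conda_list : List String) (requirements_list : List String) : List (String × String) :=
  let wh : PySem.Dict String Int := PySem.Dict.empty
  let wh := conda_list.foldl (fun d p => d.insert p (PySem.Int.bor (d.getD p 0) 1)) wh
  let wh := requirements_list.foldl (fun d p => d.insert p (PySem.Int.bor (d.getD p 0) 2)) wh
  (wh.items.filter (fun q => !(q.2 == 3))).map
    (fun q => (q.1, if q.2 == 1 then "conda" else "requirements"))

-- ===== PRECONDITION & SPEC =====
def Spec_compare_package_lists (conda_list : List String) (requirements_list : List String) (out : List (String × String)) : Prop := out = compare_package_lists_alt conda_list requirements_list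
instance (conda_list : List String) (requirements_list : List String) (out : List (String × String)) : Decidable (Spec_compare_package_lists conda_list requirements_list out) := by unfold Spec_compare_package_lists; infer_instance

-- ===== CLAIM (what is proved, stated in full; the proofs are below) =====
def Claim_equal_compare_package_lists : Prop := ∀ (conda_list : List String) (requirements_list : List String), Dom_compare_package_lists conda_list requirements_list → Spec_compare_package_lists conda_list requirements_list (compare_package_lists conda_list requirements_list)

-- ===== LEMMAS AND PROOFS =====

-- One insert loop of A's shape, starting from a dict whose items are `base` (keys all in memL, hence never
-- touched) followed by already-collected keys `s` carrying the loop's value `v`.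
theorem pv_loop (memL : List String) (v : String) :
    ∀ (xs : List String) (base : List (String × String)) (s : List String),
      (∀ q ∈ base, memL.contains q.1 = true) →
      (xs.foldl (fun d package => if memL.contains package then d else d.insert package v)
          (PySem.Dict.mk (base ++ s.map (fun p => (p, v))))).items
        = base ++ (PySem.Set.update s (xs.filter (fun p => !(memL.contains p)))).map (fun p => (p, v)) := by
  intro xs
  induction xs with
  | nil =>
    intro base s hbase
    simp [PySem.Set.update]
  | cons x xs ih =>
    intro base s hbase
    by_cases hx : memL.contains x = true
    · have hxm : x ∈ memL := by simpa using hx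
      rw [List.foldl_cons, if_pos hx, List.filter_cons, if_neg (by simp [hxm])]
      exact ih base s hbase
    · have hxm : x ∉ memL := by simpa using hx
      have hxf : memL.contains x = false := by simpa using hx
      rw [List.foldl_cons, if_neg (by simp [hxm]), List.filter_cons, if_pos (by simp [hxm]),
        PySem.Set.update_cons]
      by_cases hmem : x ∈ s
      · have hcont : (PySem.Dict.mk (base ++ s.map (fun p => (p, v)))).contains x = true := by
          simp only [PySem.Dict.contains, List.any_eq_true]
          refine ⟨(x, v), ?_, by simp⟩
          exact List.mem_append.mpr (Or.inr (List.mem_map.mpr ⟨x, hmem, rfl⟩))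
        have hins := PySem.Dict.items_insert_of_contains
          (d := PySem.Dict.mk (base ++ s.map (fun p => (p, v)))) (k := x) (v := v) hcont
        have hmapq : ∀ q ∈ base ++ s.map (fun p => (p, v)),
            (fun p => if p.1 == x then (x, v) else p) q = q := by
          intro q hq
          show (if q.1 == x then (x, v) else q) = q
          rcases List.mem_append.mp hq with hq | hq
          · have hq1 : memL.contains q.1 = true := hbase q hq
            have hne : q.1 ≠ x := by
              intro h; rw [h, hxf] at hq1; exact Bool.false_ne_true hq1
            rw [if_neg (by simpa using hne)]
          · rcases List.mem_map.mp hq with ⟨a, _, rfl⟩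
            by_cases hax : a = x
            · subst hax; simp
            · rw [if_neg (by simpa using hax)]
        have hadd : PySem.Set.add s x = s := by
          simp [PySem.Set.add, PySem.Set.contains, hmem]
        rw [show (PySem.Dict.mk (base ++ s.map (fun p => (p, v)))).insert x v
              = PySem.Dict.mk (base ++ s.map (fun p => (p, v))) from by
            apply PySem.Dict.ext
            rw [hins]
            show List.map _ (base ++ s.map (fun p => (p, v))) = _
            rw [List.map_congr_left hmapq]
            simp]
        rw [ih base s hbase, hadd]
      · have hcont : (PySem.Dict.mk (base ++ s.map (fun p => (p, v)))).contains x = false := by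
          simp only [PySem.Dict.contains, List.any_eq_false]
          intro q hq
          rcases List.mem_append.mp hq with hq | hq
          · have hq1 : memL.contains q.1 = true := hbase q hq
            have hne : q.1 ≠ x := by
              intro h; rw [h, hxf] at hq1; exact Bool.false_ne_true hq1
            simpa using hne
          · rcases List.mem_map.mp hq with ⟨a, ha, rfl⟩
            have : a ≠ x := fun h => hmem (h ▸ ha)
            simpa using this
        have hins := PySem.Dict.items_insert_of_not_contains
          (d := PySem.Dict.mk (base ++ s.map (fun p => (p, v)))) (k := x) (v := v) hcont
        have hadd : PySem.Set.add s x = s ++ [x] := by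
          simp [PySem.Set.add, PySem.Set.contains, hmem]
        have hd : (PySem.Dict.mk (base ++ s.map (fun p => (p, v)))).insert x v
            = PySem.Dict.mk (base ++ (s ++ [x]).map (fun p => (p, v))) := by
          apply PySem.Dict.ext; rw [hins]; simp
        rw [hd, ih base (s ++ [x]) hbase, hadd]

-- filtering commutes with Python set construction
theorem pv_update_filter (P : String → Bool) :
    ∀ (c : List String) (s : List String),
      PySem.Set.update (s.filter P) (c.filter P) = (PySem.Set.update s c).filter P := by
  intro c
  induction c with
  | nil => intro s; simp [PySem.Set.update]
  | cons x c ih =>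
    intro s
    rw [List.filter_cons]
    by_cases hP : P x = true
    · have hadd : PySem.Set.add (s.filter P) x = (PySem.Set.add s x).filter P := by
        by_cases hmem : x ∈ s
        · have h1 : PySem.Set.add s x = s := by
            simp [PySem.Set.add, PySem.Set.contains, hmem]
          have h2 : PySem.Set.add (s.filter P) x = s.filter P := by
            simp [PySem.Set.add, PySem.Set.contains, List.mem_filter, hmem, hP]
          rw [h1, h2]
        · have h1 : PySem.Set.add s x = s ++ [x] := by
            simp [PySem.Set.add, PySem.Set.contains, hmem]
          have h2 : PySem.Set.add (s.filter P) x = s.filter P ++ [x] := by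
            simp [PySem.Set.add, PySem.Set.contains, List.mem_filter, hmem]
          rw [h1, h2, List.filter_append, List.filter_cons, if_pos hP, List.filter_nil]
      rw [if_pos hP, PySem.Set.update_cons, PySem.Set.update_cons, hadd, ih (PySem.Set.add s x)]
    · have hP' : P x = false := by simpa using hP
      have hadd : (PySem.Set.add s x).filter P = s.filter P := by
        by_cases hmem : x ∈ s
        · have h1 : PySem.Set.add s x = s := by
            simp [PySem.Set.add, PySem.Set.contains, hmem]
          rw [h1]
        · have h1 : PySem.Set.add s x = s ++ [x] := by
            simp [PySem.Set.add, PySem.Set.contains, hmem]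
          rw [h1, List.filter_append, List.filter_cons, if_neg (by simp [hP']), List.filter_nil,
            List.append_nil]
      rw [if_neg (by simp [hP']), PySem.Set.update_cons, ← hadd, ih (PySem.Set.add s x)]

theorem pv_ofList_filter (P : String → Bool) (c : List String) :
    PySem.Set.ofList (c.filter P) = (PySem.Set.ofList c).filter P := by
  have h := pv_update_filter P c []
  simpa [PySem.Set.update_nil_left] using h

-- A's two loops, characterised
theorem pv_A (c r : List String) : compare_package_lists c r
    = (PySem.Set.ofList (c.filter (fun p => !(r.contains p)))).map (fun p => (p, "conda"))
      ++ (PySem.Set.ofList (r.filter (fun p => !(c.contains p)))).map (fun p => (p, "requirements")) := by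
  have hA1 := pv_loop r "conda" c [] [] (by intro q hq; simp at hq)
  simp only [List.nil_append, List.map_nil, List.append_nil, PySem.Set.update_nil_left] at hA1
  have hd1 : c.foldl (fun d package => if r.contains package then d else d.insert package "conda")
      (PySem.Dict.mk []) = PySem.Dict.mk
        ((PySem.Set.ofList (c.filter (fun p => !(r.contains p)))).map (fun p => (p, "conda"))) := by
    apply PySem.Dict.ext; exact hA1
  have hbase : ∀ q ∈ (PySem.Set.ofList (c.filter (fun p => !(r.contains p)))).map
      (fun p => (p, "conda")), c.contains q.1 = true := by
    intro q hq
    rcases List.mem_map.mp hq with ⟨a, ha, rfl⟩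
    have ha' : a ∈ c.filter (fun p => !(r.contains p)) := (PySem.Set.mem_ofList _ _).mp ha
    simp only [List.contains_iff_mem]
    simpa using (List.mem_filter.mp ha').1
  have hA2 := pv_loop c "requirements" r
      ((PySem.Set.ofList (c.filter (fun p => !(r.contains p)))).map (fun p => (p, "conda"))) [] hbase
  simp only [List.map_nil, List.append_nil, PySem.Set.update_nil_left] at hA2
  show (r.foldl (fun d package => if c.contains package then d else d.insert package "requirements")
    (c.foldl (fun d package => if r.contains package then d else d.insert package "conda")
      PySem.Dict.empty)).items = _
  have hempty : (PySem.Dict.empty : PySem.Dict String String) = PySem.Dict.mk [] := rfl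
  rw [hempty, hd1, hA2]

-- getD on a literal dict, one entry at a time
theorem pv_getD_mk_cons (k : String) (v : Int) (rest : List (String × Int)) (x : String) (d : Int) :
    (PySem.Dict.mk ((k, v) :: rest)).getD x d = if k == x then v else (PySem.Dict.mk rest).getD x d := by
  rw [PySem.Dict.getD_eq_get?_getD, PySem.Dict.get?_mk_cons]
  split
  · rfl
  · rw [← PySem.Dict.getD_eq_get?_getD]

-- getD hits the first segment when the key is one of its (function-valued) keys
theorem pv_getD_mk_map_append (f : String → Int) (rest : List (String × Int)) :
    ∀ (l : List String) (x : String), x ∈ l →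
      (PySem.Dict.mk (l.map (fun p => (p, f p)) ++ rest)).getD x 0 = f x := by
  intro l
  induction l with
  | nil => intro x hx; simp at hx
  | cons y ys ih =>
    intro x hx
    rw [List.map_cons, List.cons_append, pv_getD_mk_cons]
    by_cases hyx : y = x
    · subst hyx; simp
    · rw [if_neg (by simpa using hyx)]
      refine ih x ?_
      rcases List.mem_cons.mp hx with h | h
      · exact absurd h.symm hyx
      · exact h

-- getD skips a whole segment of foreign keys
theorem pv_getD_mk_append_of_ne :
    ∀ (l₁ : List (String × Int)) (l₂ : List (String × Int)) (x : String) (d : Int),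
      (∀ q ∈ l₁, q.1 ≠ x) →
      (PySem.Dict.mk (l₁ ++ l₂)).getD x d = (PySem.Dict.mk l₂).getD x d := by
  intro l₁
  induction l₁ with
  | nil => intro l₂ x d _; simp
  | cons q qs ih =>
    intro l₂ x d h
    obtain ⟨k, v⟩ := q
    have hk : k ≠ x := h (k, v) List.mem_cons_self
    rw [List.cons_append, pv_getD_mk_cons, if_neg (by simpa using hk)]
    exact ih l₂ x d (fun q hq => h q (List.mem_cons_of_mem _ hq))

-- B's first loop: marking with `| 1` over a dict whose entries all carry value 1 is ordered dedup.
theorem pv_mark1 :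
    ∀ (xs : List String) (s : List String),
      xs.foldl (fun d p => d.insert p (PySem.Int.bor (d.getD p 0) 1))
          (PySem.Dict.mk (s.map (fun p => (p, (1 : Int)))))
        = PySem.Dict.mk ((PySem.Set.update s xs).map (fun p => (p, (1 : Int)))) := by
  intro xs
  induction xs with
  | nil => intro s; simp [PySem.Set.update]
  | cons x xs ih =>
    intro s
    rw [List.foldl_cons, PySem.Set.update_cons]
    by_cases hmem : x ∈ s
    · have hget : (PySem.Dict.mk (s.map (fun p => (p, (1 : Int))))).getD x 0 = 1 := by
        simpa using pv_getD_mk_map_append (fun _ => (1 : Int)) [] s x hmem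
      have hcont : (PySem.Dict.mk (s.map (fun p => (p, (1 : Int))))).contains x = true := by
        simp only [PySem.Dict.contains, List.any_eq_true]
        exact ⟨(x, 1), List.mem_map.mpr ⟨x, hmem, rfl⟩, by simp⟩
      have hins := PySem.Dict.items_insert_of_contains
        (d := PySem.Dict.mk (s.map (fun p => (p, (1 : Int))))) (k := x)
        (v := PySem.Int.bor ((PySem.Dict.mk (s.map (fun p => (p, (1 : Int))))).getD x 0) 1) hcont
      have hbor : PySem.Int.bor (1 : Int) 1 = 1 := by decide
      have hmapq : ∀ q ∈ s.map (fun p => (p, (1 : Int))),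
          (fun p : String × Int => if p.1 == x then (x, (1 : Int)) else p) q = q := by
        intro q hq
        rcases List.mem_map.mp hq with ⟨a, _, rfl⟩
        show (if a == x then (x, (1 : Int)) else (a, 1)) = (a, 1)
        by_cases hax : a = x
        · subst hax; simp
        · rw [if_neg (by simpa using hax)]
      have hid : (PySem.Dict.mk (s.map (fun p => (p, (1 : Int))))).insert x
            (PySem.Int.bor ((PySem.Dict.mk (s.map (fun p => (p, (1 : Int))))).getD x 0) 1)
          = PySem.Dict.mk (s.map (fun p => (p, (1 : Int)))) := by
        apply PySem.Dict.ext
        rw [hins, hget, hbor]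
        show List.map _ (s.map (fun p => (p, (1 : Int)))) = _
        rw [List.map_congr_left hmapq]
        simp
      have hadd : PySem.Set.add s x = s := by
        simp [PySem.Set.add, PySem.Set.contains, hmem]
      rw [hid, ih s, hadd]
    · have hcont : (PySem.Dict.mk (s.map (fun p => (p, (1 : Int))))).contains x = false := by
        simp only [PySem.Dict.contains, List.any_eq_false]
        intro q hq
        rcases List.mem_map.mp hq with ⟨a, ha, rfl⟩
        have : a ≠ x := fun h => hmem (h ▸ ha)
        simpa using this
      have hget : (PySem.Dict.mk (s.map (fun p => (p, (1 : Int))))).getD x 0 = 0 :=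
        PySem.Dict.getD_of_not_contains _ _ hcont
      have hins := PySem.Dict.items_insert_of_not_contains
        (d := PySem.Dict.mk (s.map (fun p => (p, (1 : Int))))) (k := x)
        (v := PySem.Int.bor ((PySem.Dict.mk (s.map (fun p => (p, (1 : Int))))).getD x 0) 1) hcont
      have hbor : PySem.Int.bor (0 : Int) 1 = 1 := by decide
      have hd : (PySem.Dict.mk (s.map (fun p => (p, (1 : Int))))).insert x
            (PySem.Int.bor ((PySem.Dict.mk (s.map (fun p => (p, (1 : Int))))).getD x 0) 1)
          = PySem.Dict.mk ((s ++ [x]).map (fun p => (p, (1 : Int)))) := by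
        apply PySem.Dict.ext; rw [hins, hget, hbor]; simp
      have hadd : PySem.Set.add s x = s ++ [x] := by
        simp [PySem.Set.add, PySem.Set.contains, hmem]
      rw [hd, ih (s ++ [x]), hadd]

-- B's second loop: marking with `| 2` over a dict of F-entries valued by m (each 1 or 3) followed by
-- fresh s-entries valued 2: F-values of hit keys become 3, new keys append with 2.
theorem pv_mark2 (F : List String) :
    ∀ (xs : List String) (m : String → Int) (s : List String),
      (∀ p, m p = 1 ∨ m p = 3) → (∀ p ∈ s, p ∉ F) →
      (xs.foldl (fun d p => d.insert p (PySem.Int.bor (d.getD p 0) 2))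
          (PySem.Dict.mk (F.map (fun p => (p, m p)) ++ s.map (fun p => (p, (2 : Int)))))).items
        = F.map (fun p => (p, if xs.contains p then (3 : Int) else m p))
          ++ (PySem.Set.update s (xs.filter (fun p => !(F.contains p)))).map (fun p => (p, (2 : Int))) := by
  intro xs
  induction xs with
  | nil =>
    intro m s hm hs
    simp [PySem.Set.update]
  | cons x xs ih =>
    intro m s hm hs
    rw [List.foldl_cons, List.filter_cons]
    by_cases hxF : x ∈ F
    · -- key x lives in the F-part: its value m x (1 or 3) becomes 3, in place
      have hget : (PySem.Dict.mk (F.map (fun p => (p, m p)) ++ s.map (fun p => (p, (2 : Int))))).getD x 0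
          = m x := pv_getD_mk_map_append m (s.map (fun p => (p, (2 : Int)))) F x hxF
      have hcont : (PySem.Dict.mk (F.map (fun p => (p, m p)) ++ s.map (fun p => (p, (2 : Int))))).contains x = true := by
        simp only [PySem.Dict.contains, List.any_eq_true]
        exact ⟨(x, m x), List.mem_append.mpr (Or.inl (List.mem_map.mpr ⟨x, hxF, rfl⟩)), by simp⟩
      have hins := PySem.Dict.items_insert_of_contains
        (d := PySem.Dict.mk (F.map (fun p => (p, m p)) ++ s.map (fun p => (p, (2 : Int))))) (k := x)
        (v := PySem.Int.bor ((PySem.Dict.mk (F.map (fun p => (p, m p)) ++ s.map (fun p => (p, (2 : Int))))).getD x 0) 2) hcont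
      have hbor : PySem.Int.bor (m x) 2 = 3 := by
        rcases hm x with h | h <;> rw [h] <;> decide
      set m' : String → Int := fun p => if p = x then 3 else m p with hm'def
      have hm' : ∀ p, m' p = 1 ∨ m' p = 3 := by
        intro p; by_cases hp : p = x <;> simp [hm'def, hp, hm p]
      have hd : (PySem.Dict.mk (F.map (fun p => (p, m p)) ++ s.map (fun p => (p, (2 : Int))))).insert x
            (PySem.Int.bor ((PySem.Dict.mk (F.map (fun p => (p, m p)) ++ s.map (fun p => (p, (2 : Int))))).getD x 0) 2)
          = PySem.Dict.mk (F.map (fun p => (p, m' p)) ++ s.map (fun p => (p, (2 : Int)))) := by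
        apply PySem.Dict.ext
        rw [hins, hget, hbor]
        show List.map _ (F.map (fun p => (p, m p)) ++ s.map (fun p => (p, (2 : Int)))) = _
        rw [List.map_append, List.map_map, List.map_map]
        congr 1
        · apply List.map_congr_left
          intro a _
          show (if a == x then (x, (3 : Int)) else (a, m a)) = (a, m' a)
          by_cases hax : a = x
          · subst hax; simp [hm'def]
          · rw [if_neg (by simpa using hax)]; simp [hm'def, hax]
        · apply List.map_congr_left
          intro a ha
          show (if a == x then (x, (3 : Int)) else (a, 2)) = (a, 2)
          have : a ≠ x := fun h => (hs a ha) (h ▸ hxF)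
          rw [if_neg (by simpa using this)]
      have hxFt : F.contains x = true := by simpa using hxF
      rw [hd, ih m' s hm' hs, if_neg (by simp only [hxFt]; decide)]
      congr 1
      apply List.map_congr_left
      intro a _
      by_cases hax : a = x
      · subst hax
        simp [hm'def]
      · have hc : ((x :: xs).contains a) = (xs.contains a) := by
          simp [hax]
        rw [hc]
        simp only [hm'def]
        rw [if_neg hax]
    · have hxFc : F.contains x = false := by simpa using hxF
      rw [if_pos (by simp only [hxFc]; decide), PySem.Set.update_cons]
      have hFne : ∀ q ∈ F.map (fun p => (p, m p)), q.1 ≠ x := by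
        intro q hq
        rcases List.mem_map.mp hq with ⟨a, ha, rfl⟩
        exact fun h => hxF (h ▸ ha)
      have hFcongr : F.map (fun p => (p, if (x :: xs).contains p then (3 : Int) else m p))
          = F.map (fun p => (p, if xs.contains p then (3 : Int) else m p)) := by
        apply List.map_congr_left
        intro a ha
        have hax : a ≠ x := fun h => hxF (h ▸ ha)
        have hc : ((x :: xs).contains a) = (xs.contains a) := by
          simp [hax]
        rw [hc]
      by_cases hmem : x ∈ s
      · -- key x is already a collected s-entry with value 2; 2 | 2 = 2, dict unchanged
        have hget : (PySem.Dict.mk (F.map (fun p => (p, m p)) ++ s.map (fun p => (p, (2 : Int))))).getD x 0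
            = 2 := by
          rw [pv_getD_mk_append_of_ne _ _ _ _ hFne]
          simpa using pv_getD_mk_map_append (fun _ => (2 : Int)) [] s x hmem
        have hcont : (PySem.Dict.mk (F.map (fun p => (p, m p)) ++ s.map (fun p => (p, (2 : Int))))).contains x = true := by
          simp only [PySem.Dict.contains, List.any_eq_true]
          exact ⟨(x, 2), List.mem_append.mpr (Or.inr (List.mem_map.mpr ⟨x, hmem, rfl⟩)), by simp⟩
        have hins := PySem.Dict.items_insert_of_contains
          (d := PySem.Dict.mk (F.map (fun p => (p, m p)) ++ s.map (fun p => (p, (2 : Int))))) (k := x)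
          (v := PySem.Int.bor ((PySem.Dict.mk (F.map (fun p => (p, m p)) ++ s.map (fun p => (p, (2 : Int))))).getD x 0) 2) hcont
        have hbor : PySem.Int.bor (2 : Int) 2 = 2 := by decide
        have hmapq : ∀ q ∈ F.map (fun p => (p, m p)) ++ s.map (fun p => (p, (2 : Int))),
            (fun p : String × Int => if p.1 == x then (x, (2 : Int)) else p) q = q := by
          intro q hq
          rcases List.mem_append.mp hq with hq | hq
          · have : q.1 ≠ x := hFne q hq
            show (if q.1 == x then (x, (2 : Int)) else q) = q
            rw [if_neg (by simpa using this)]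
          · rcases List.mem_map.mp hq with ⟨a, _, rfl⟩
            show (if a == x then (x, (2 : Int)) else (a, 2)) = (a, 2)
            by_cases hax : a = x
            · subst hax; simp
            · rw [if_neg (by simpa using hax)]
        have hd : (PySem.Dict.mk (F.map (fun p => (p, m p)) ++ s.map (fun p => (p, (2 : Int))))).insert x
              (PySem.Int.bor ((PySem.Dict.mk (F.map (fun p => (p, m p)) ++ s.map (fun p => (p, (2 : Int))))).getD x 0) 2)
            = PySem.Dict.mk (F.map (fun p => (p, m p)) ++ s.map (fun p => (p, (2 : Int)))) := by
          apply PySem.Dict.ext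
          rw [hins, hget, hbor]
          show List.map _ (F.map (fun p => (p, m p)) ++ s.map (fun p => (p, (2 : Int)))) = _
          rw [List.map_congr_left hmapq]
          simp [Function.comp_def]
        have hadd : PySem.Set.add s x = s := by
          simp [PySem.Set.add, PySem.Set.contains, hmem]
        rw [hd, ih m s hm hs, hadd, hFcongr]
      · -- fresh key: appended with value 0 | 2 = 2
        have hcont : (PySem.Dict.mk (F.map (fun p => (p, m p)) ++ s.map (fun p => (p, (2 : Int))))).contains x = false := by
          simp only [PySem.Dict.contains, List.any_eq_false]
          intro q hq
          rcases List.mem_append.mp hq with hq | hq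
          · have := hFne q hq
            simpa using this
          · rcases List.mem_map.mp hq with ⟨a, ha, rfl⟩
            have : a ≠ x := fun h => hmem (h ▸ ha)
            simpa using this
        have hget : (PySem.Dict.mk (F.map (fun p => (p, m p)) ++ s.map (fun p => (p, (2 : Int))))).getD x 0 = 0 :=
          PySem.Dict.getD_of_not_contains _ _ hcont
        have hins := PySem.Dict.items_insert_of_not_contains
          (d := PySem.Dict.mk (F.map (fun p => (p, m p)) ++ s.map (fun p => (p, (2 : Int))))) (k := x)
          (v := PySem.Int.bor ((PySem.Dict.mk (F.map (fun p => (p, m p)) ++ s.map (fun p => (p, (2 : Int))))).getD x 0) 2) hcont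
        have hbor : PySem.Int.bor (0 : Int) 2 = 2 := by decide
        have hd : (PySem.Dict.mk (F.map (fun p => (p, m p)) ++ s.map (fun p => (p, (2 : Int))))).insert x
              (PySem.Int.bor ((PySem.Dict.mk (F.map (fun p => (p, m p)) ++ s.map (fun p => (p, (2 : Int))))).getD x 0) 2)
            = PySem.Dict.mk (F.map (fun p => (p, m p)) ++ (s ++ [x]).map (fun p => (p, (2 : Int)))) := by
          apply PySem.Dict.ext; rw [hins, hget, hbor]; simp
        have hadd : PySem.Set.add s x = s ++ [x] := by
          simp [PySem.Set.add, PySem.Set.contains, hmem]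
        have hs' : ∀ p ∈ s ++ [x], p ∉ F := by
          intro p hp
          rcases List.mem_append.mp hp with h | h
          · exact hs p h
          · simp at h; subst h; exact hxF
        rw [hd, ih m (s ++ [x]) hm hs', hadd, hFcongr]

-- B's whole computation, characterised to the same normal form as A's
theorem pv_B (c r : List String) : compare_package_lists_alt c r
    = (PySem.Set.ofList (c.filter (fun p => !(r.contains p)))).map (fun p => (p, "conda"))
      ++ (PySem.Set.ofList (r.filter (fun p => !(c.contains p)))).map (fun p => (p, "requirements")) := by
  have h1 := pv_mark1 c []
  simp only [List.map_nil, PySem.Set.update_nil_left] at h1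
  have h2 := pv_mark2 (PySem.Set.ofList c) r (fun _ => 1) []
    (fun _ => Or.inl rfl) (by intro p hp; simp at hp)
  simp only [List.map_nil, List.append_nil, PySem.Set.update_nil_left] at h2
  show ((r.foldl (fun d p => d.insert p (PySem.Int.bor (d.getD p 0) 2))
      (c.foldl (fun d p => d.insert p (PySem.Int.bor (d.getD p 0) 1))
        PySem.Dict.empty)).items.filter (fun q => !(q.2 == 3))).map
      (fun q => (q.1, if q.2 == 1 then "conda" else "requirements")) = _
  have hempty : (PySem.Dict.empty : PySem.Dict String Int) = PySem.Dict.mk [] := rfl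
  rw [hempty, h1, h2]
  rw [List.filter_append]
  -- the F-segment keeps exactly the keys not in r, each with value 1
  have hF : ((PySem.Set.ofList c).map (fun p => (p, if r.contains p then (3 : Int) else 1))).filter
        (fun q => !(q.2 == 3))
      = ((PySem.Set.ofList c).filter (fun p => !(r.contains p))).map (fun p => (p, (1 : Int))) := by
    rw [List.filter_map]
    have hpred : ∀ a ∈ PySem.Set.ofList c,
        ((fun q : String × Int => !(q.2 == 3)) ∘ (fun p => (p, if r.contains p then (3 : Int) else 1))) a
          = (fun p => !(r.contains p)) a := by
      intro a _
      by_cases h : a ∈ r <;> simp [h]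
    rw [List.filter_congr hpred]
    apply List.map_congr_left
    intro a ha
    have : r.contains a = false := by
      have := (List.mem_filter.mp ha).2
      simpa using this
    rw [if_neg (by simpa using this)]
  -- the s-segment (all values 2) survives the filter whole
  have hS : (((PySem.Set.ofList (r.filter (fun p => !(List.contains (PySem.Set.ofList c) p)))).map
        (fun p => (p, (2 : Int)))).filter (fun q => !(q.2 == 3)))
      = (PySem.Set.ofList (r.filter (fun p => !(List.contains (PySem.Set.ofList c) p)))).map
        (fun p => (p, (2 : Int))) := by
    apply List.filter_eq_self.mpr
    intro q hq
    rcases List.mem_map.mp hq with ⟨a, _, rfl⟩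
    simp
  rw [hF, hS, List.map_append, List.map_map, List.map_map]
  congr 1
  · rw [pv_ofList_filter]
    apply List.map_congr_left
    intro a _
    simp
  · have hfc : r.filter (fun p => !(List.contains (PySem.Set.ofList c) p))
        = r.filter (fun p => !(c.contains p)) := by
      apply List.filter_congr
      intro a _
      simp [PySem.Set.mem_ofList]
    rw [hfc]
    apply List.map_congr_left
    intro a _
    simp

-- ===== VERDICT (by name: the statement is the Claim_ definition above) =====
theorem compare_package_lists_spec : Claim_equal_compare_package_lists := by
  intro c r _
  unfold Spec_compare_package_lists
  rw [pv_A, pv_B]
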